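-- pv_equiv track=rewrite | github.com/badvision/clawed | skills/research/council.py | _select_chairman
-- ===== SOURCE A (Python) =====
-- CHAIRMAN_PREFERENCE = {
--     "code-review": ["gemini", "openai", "anthropic", "perplexity"],
--     "research": ["perplexity", "gemini", "openai", "anthropic"],
--     "bug-analysis": ["gemini", "openai", "anthropic", "perplexity"],
--     "comparison": ["gemini", "openai", "anthropic", "perplexity"],
-- }
--
-- def _select_chairman(providers: list[str], task_type: str) -> str:
--     """Pick the best available chairman based on task type preference order."""
--     if not providers:
--         raise RuntimeError("No providers available for chairman selection")
--     preference = CHAIRMAN_PREFERENCE.get(task_type, CHAIRMAN_PREFERENCE["research"])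
--     for candidate in preference:
--         if candidate in providers:
--             return candidate
--     return providers[0]
-- ===== SOURCE B (Python) =====
-- CHAIRMAN_PREFERENCE = {
--     "code-review": ["gemini", "openai", "anthropic", "perplexity"],
--     "research": ["perplexity", "gemini", "openai", "anthropic"],
--     "bug-analysis": ["gemini", "openai", "anthropic", "perplexity"],
--     "comparison": ["gemini", "openai", "anthropic", "perplexity"],
-- }
--
-- def _select_chairman(providers: list[str], task_type: str) -> str:
--     """Pick the best available chairman: single pass over providers with a rank dict."""
--     if not providers:
--         raise RuntimeError("No providers available for chairman selection")
--     rank = {name: i for i, name in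
--             enumerate(CHAIRMAN_PREFERENCE.get(task_type, CHAIRMAN_PREFERENCE["research"]))}
--     best = None  # (provider, rank) with the smallest rank seen so far
--     for provider in providers:
--         r = rank.get(provider)
--         if r is not None and (best is None or r < best[1]):
--             best = (provider, r)
--     return best[0] if best is not None else providers[0]
-- ===== Notes on version B (the rewrite author's own statement) =====
-- stated objective: alternative
-- what changed: Instead of scanning providers once per preference entry (membership test inside a loop over the preference list), B builds a name->rank dict from the preference list and makes a single pass over providers keeping the provider with the smallest rank; the fallback providers[0] fires only when no provider is ranked.
import Mathlib
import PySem

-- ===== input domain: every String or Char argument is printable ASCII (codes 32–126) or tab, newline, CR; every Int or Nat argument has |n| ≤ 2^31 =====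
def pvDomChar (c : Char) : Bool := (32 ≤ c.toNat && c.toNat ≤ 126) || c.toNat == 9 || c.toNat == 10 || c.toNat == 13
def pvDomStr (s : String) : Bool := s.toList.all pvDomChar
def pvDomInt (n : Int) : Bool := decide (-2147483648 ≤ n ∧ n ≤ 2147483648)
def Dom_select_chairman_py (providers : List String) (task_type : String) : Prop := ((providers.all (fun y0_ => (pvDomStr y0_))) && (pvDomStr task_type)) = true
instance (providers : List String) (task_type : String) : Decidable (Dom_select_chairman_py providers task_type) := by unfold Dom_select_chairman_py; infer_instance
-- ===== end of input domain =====

set_option maxHeartbeats 1600000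
set_option maxRecDepth 8192

-- B replaces A's loop over the preference list (a membership scan of providers per preference
-- entry) by a rank dict built once from the preference list and a single pass over providers
-- keeping the provider of smallest rank; objective: alternative.

-- ===== PORT A =====
def pvPrefDict : PySem.Dict String (List String) :=
  PySem.Dict.ofList
    [("code-review", ["gemini", "openai", "anthropic", "perplexity"]),
     ("research", ["perplexity", "gemini", "openai", "anthropic"]),
     ("bug-analysis", ["gemini", "openai", "anthropic", "perplexity"]),
     ("comparison", ["gemini", "openai", "anthropic", "perplexity"])]

-- A's `for candidate in preference: if candidate in providers: return candidate`
def pvFindCand (providers : List String) : List String → Option String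
  | [] => none
  | c :: rest => if providers.contains c then some c else pvFindCand providers rest

-- the loop plus A's final `return providers[0]`
def pvFindMain (providers : List String) (preference : List String) : String :=
  match pvFindCand providers preference with
  | some c => c
  | none => providers.headD ""   -- providers[0], providers nonempty whenever this is reached

def select_chairman_py (providers : List String) (task_type : String) : String :=
  if providers.isEmpty then ""   -- Python raises RuntimeError here; excluded by Pre_
  else pvFindMain providers ((pvPrefDict.get? task_type).getD ((pvPrefDict.get? "research").getD []))

-- ===== PORT B =====
-- rank = {name: i for i, name in enumerate(preference)}
def pvRankOf (pref : List String) : PySem.Dict String Int :=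
  (PySem.List.enumerate pref).foldl (fun d p => d.insert p.2 p.1) PySem.Dict.empty

-- B's `for provider in providers` loop carrying `best`
def pvBestLoop (rank : PySem.Dict String Int) : List String → Option (String × Int) → Option (String × Int)
  | [], best => best
  | p :: rest, best =>
      pvBestLoop rank rest
        (match rank.get? p with
         | some r =>
             match best with
             | none => some (p, r)
             | some b => if r < b.2 then some (p, r) else some b
         | none => best)

-- the loop plus B's final `best[0] if best is not None else providers[0]`
def pvBestMain (providers : List String) (preference : List String) : String :=
  match pvBestLoop (pvRankOf preference) providers none with
  | some b => b.1
  | none => providers.headD ""   -- providers[0]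

def select_chairman_py_alt (providers : List String) (task_type : String) : String :=
  if providers.isEmpty then ""   -- Python raises RuntimeError here; excluded by Pre_
  else pvBestMain providers ((pvPrefDict.get? task_type).getD ((pvPrefDict.get? "research").getD []))

-- ===== PRECONDITION & SPEC =====
-- A raises RuntimeError exactly on empty providers; only that input is excluded.
def Pre_select_chairman_py (providers : List String) (task_type : String) : Prop := providers ≠ []
instance (providers : List String) (task_type : String) : Decidable (Pre_select_chairman_py providers task_type) := by unfold Pre_select_chairman_py; infer_instance
def pvWitness_select_chairman_py : List String × String := (["gemini", "claude"], "research")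

def Spec_select_chairman_py (providers : List String) (task_type : String) (out : String) : Prop := out = select_chairman_py_alt providers task_type
instance (providers : List String) (task_type : String) (out : String) : Decidable (Spec_select_chairman_py providers task_type out) := by unfold Spec_select_chairman_py; infer_instance

-- ===== CLAIM (what is proved, stated in full; the proofs are below) =====
def Claim_equal_select_chairman_py : Prop := ∀ (providers : List String) (task_type : String), Dom_select_chairman_py providers task_type → Pre_select_chairman_py providers task_type → Spec_select_chairman_py providers task_type (select_chairman_py providers task_type)

-- ===== LEMMAS AND PROOFS =====

-- rank lookup as an if-chain over the four preference names
def pvRLook (c0 c1 c2 c3 : String) (x : String) : Option Int :=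
  if x = c0 then some 0 else if x = c1 then some 1 else if x = c2 then some 2
  else if x = c3 then some 3 else none

-- rank of x, with 4 for "not ranked"
def pvRkx (c0 c1 c2 c3 : String) (x : String) : Int :=
  if x = c0 then 0 else if x = c1 then 1 else if x = c2 then 2 else if x = c3 then 3 else 4

-- smallest rank present in xs (4 = none)
def pvBrk (c0 c1 c2 c3 : String) (xs : List String) : Int :=
  if c0 ∈ xs then 0 else if c1 ∈ xs then 1 else if c2 ∈ xs then 2
  else if c3 ∈ xs then 3 else 4

-- the loop state determined by its rank
def pvDecode (c0 c1 c2 c3 : String) (r : Int) : Option (String × Int) :=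
  if r = 0 then some (c0, 0) else if r = 1 then some (c1, 1) else if r = 2 then some (c2, 2)
  else if r = 3 then some (c3, 3) else none

lemma pvBrk_nonneg (c0 c1 c2 c3 : String) (xs : List String) : 0 ≤ pvBrk c0 c1 c2 c3 xs := by
  unfold pvBrk; split_ifs <;> omega

lemma pvRkx_nonneg (c0 c1 c2 c3 x : String) : 0 ≤ pvRkx c0 c1 c2 c3 x := by
  unfold pvRkx; split_ifs <;> omega

lemma pvBrk_cons (c0 c1 c2 c3 x : String) (xs : List String) :
    pvBrk c0 c1 c2 c3 (x :: xs) = min (pvRkx c0 c1 c2 c3 x) (pvBrk c0 c1 c2 c3 xs) := by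
  unfold pvBrk pvRkx
  simp only [List.mem_cons]
  by_cases h0 : x = c0 <;> by_cases h1 : x = c1 <;> by_cases h2 : x = c2 <;> by_cases h3 : x = c3 <;>
    simp [h0, h1, h2, h3, eq_comm] <;> split_ifs <;> first | omega | tauto

lemma pvStep_eq (c0 c1 c2 c3 x : String) (r : Int) (hr : 0 ≤ r) :
    (match pvRLook c0 c1 c2 c3 x with
     | some rr =>
         match pvDecode c0 c1 c2 c3 r with
         | none => some (x, rr)
         | some b => if rr < b.2 then some (x, rr) else some b
     | none => pvDecode c0 c1 c2 c3 r) =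
    pvDecode c0 c1 c2 c3 (min r (pvRkx c0 c1 c2 c3 x)) := by
  unfold pvRLook pvRkx
  by_cases h0 : x = c0
  · simp only [h0]
    unfold pvDecode; split_ifs <;> first | rfl | omega
  · simp only [if_neg h0]
    by_cases h1 : x = c1
    · simp only [h1]
      unfold pvDecode; split_ifs <;> first | rfl | omega
    · simp only [if_neg h1]
      by_cases h2 : x = c2
      · simp only [h2]
        unfold pvDecode; split_ifs <;> first | rfl | omega
      · simp only [if_neg h2]
        by_cases h3 : x = c3
        · simp only [h3]
          unfold pvDecode; split_ifs <;> first | rfl | omega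
        · simp only [if_neg h3]
          unfold pvDecode; split_ifs <;> first | rfl | omega

lemma pvBestLoop_decode (c0 c1 c2 c3 : String) (rk : PySem.Dict String Int)
    (hget : ∀ x, rk.get? x = pvRLook c0 c1 c2 c3 x) :
    ∀ (xs : List String) (r : Int), 0 ≤ r →
      pvBestLoop rk xs (pvDecode c0 c1 c2 c3 r) =
        pvDecode c0 c1 c2 c3 (min r (pvBrk c0 c1 c2 c3 xs)) := by
  intro xs
  induction xs with
  | nil =>
      intro r hr
      simp only [pvBestLoop, pvBrk, List.not_mem_nil, if_false]
      unfold pvDecode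
      split_ifs <;> first | rfl | omega
  | cons x t ih =>
      intro r hr
      simp only [pvBestLoop]
      rw [hget x, pvStep_eq _ _ _ _ _ _ hr, ih _ (le_min hr (pvRkx_nonneg c0 c1 c2 c3 x)), pvBrk_cons]
      congr 1
      omega

lemma pvMain (c0 c1 c2 c3 : String) (rk : PySem.Dict String Int)
    (hget : ∀ x, rk.get? x = pvRLook c0 c1 c2 c3 x) (provs : List String) :
    pvFindMain provs [c0, c1, c2, c3] =
    (match pvBestLoop rk provs none with
     | some b => b.1
     | none => provs.headD "") := by
  have hnone : (none : Option (String × Int)) = pvDecode c0 c1 c2 c3 4 := rfl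
  rw [hnone, pvBestLoop_decode c0 c1 c2 c3 rk hget provs 4 (by omega)]
  have h4 : min (4 : Int) (pvBrk c0 c1 c2 c3 provs) = pvBrk c0 c1 c2 c3 provs := by
    have := pvBrk_nonneg c0 c1 c2 c3 provs
    unfold pvBrk at *; split_ifs at * <;> omega
  rw [h4]
  unfold pvFindMain pvBrk pvDecode
  simp only [pvFindCand]
  by_cases m0 : c0 ∈ provs
  · simp [m0]
  · simp only [if_neg m0]
    by_cases m1 : c1 ∈ provs
    · simp [m0, m1]
    · simp only [if_neg m1]
      by_cases m2 : c2 ∈ provs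
      · simp [m0, m1, m2]
      · simp only [if_neg m2]
        by_cases m3 : c3 ∈ provs
        · simp [m0, m1, m2, m3]
        · simp [m0, m1, m2, m3]

lemma pvHget1 : ∀ x, (pvRankOf ["gemini", "openai", "anthropic", "perplexity"]).get? x =
    pvRLook "gemini" "openai" "anthropic" "perplexity" x := by
  intro x
  have h : pvRankOf ["gemini", "openai", "anthropic", "perplexity"] =
      PySem.Dict.mk [("gemini", (0 : Int)), ("openai", 1), ("anthropic", 2), ("perplexity", 3)] := by
    decide
  rw [h]
  simp only [PySem.Dict.get?_mk_cons, pvRLook, beq_iff_eq]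
  by_cases h0 : x = "gemini" <;> by_cases h1 : x = "openai" <;> by_cases h2 : x = "anthropic" <;>
    by_cases h3 : x = "perplexity" <;>
    simp only [h0, h1, h2, h3, if_true, if_false, PySem.Dict.get?] <;>
    simp_all [eq_comm]

lemma pvHget2 : ∀ x, (pvRankOf ["perplexity", "gemini", "openai", "anthropic"]).get? x =
    pvRLook "perplexity" "gemini" "openai" "anthropic" x := by
  intro x
  have h : pvRankOf ["perplexity", "gemini", "openai", "anthropic"] =
      PySem.Dict.mk [("perplexity", (0 : Int)), ("gemini", 1), ("openai", 2), ("anthropic", 3)] := by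
    decide
  rw [h]
  simp only [PySem.Dict.get?_mk_cons, pvRLook, beq_iff_eq]
  by_cases h0 : x = "perplexity" <;> by_cases h1 : x = "gemini" <;> by_cases h2 : x = "openai" <;>
    by_cases h3 : x = "anthropic" <;>
    simp only [h0, h1, h2, h3, if_true, if_false, PySem.Dict.get?] <;>
    simp_all [eq_comm]

-- A = B for each of the two concrete preference lists
lemma pvFB1 (provs : List String) :
    pvFindMain provs ["gemini", "openai", "anthropic", "perplexity"] =
    pvBestMain provs ["gemini", "openai", "anthropic", "perplexity"] :=
  pvMain _ _ _ _ _ pvHget1 provs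

lemma pvFB2 (provs : List String) :
    pvFindMain provs ["perplexity", "gemini", "openai", "anthropic"] =
    pvBestMain provs ["perplexity", "gemini", "openai", "anthropic"] :=
  pvMain _ _ _ _ _ pvHget2 provs

-- the preference actually selected, per task_type
lemma pvPref_default (task_type : String) (h1 : task_type ≠ "code-review")
    (h2 : task_type ≠ "research") (h3 : task_type ≠ "bug-analysis") (h4 : task_type ≠ "comparison") :
    (pvPrefDict.get? task_type).getD ((pvPrefDict.get? "research").getD []) =
      ["perplexity", "gemini", "openai", "anthropic"] := by
  have h : pvPrefDict =
      PySem.Dict.mk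
        [("code-review", ["gemini", "openai", "anthropic", "perplexity"]),
         ("research", ["perplexity", "gemini", "openai", "anthropic"]),
         ("bug-analysis", ["gemini", "openai", "anthropic", "perplexity"]),
         ("comparison", ["gemini", "openai", "anthropic", "perplexity"])] := by decide
  rw [h]
  simp only [PySem.Dict.get?_mk_cons, beq_iff_eq]
  rw [if_neg (fun he => h1 he.symm), if_neg (fun he => h2 he.symm),
      if_neg (fun he => h3 he.symm), if_neg (fun he => h4 he.symm)]
  simp [PySem.Dict.get?]

-- ===== VERDICT (by name: the statement is the Claim_ definition above) =====
theorem select_chairman_py_spec : Claim_equal_select_chairman_py := by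
  intro providers task_type _ hpre
  unfold Spec_select_chairman_py select_chairman_py select_chairman_py_alt
  have hne : providers.isEmpty = false := by
    cases providers with
    | nil => exact absurd rfl hpre
    | cons a t => rfl
  rw [hne]
  simp only [Bool.false_eq_true, if_false]
  by_cases h1 : task_type = "code-review"
  · subst h1; exact pvFB1 providers
  · by_cases h2 : task_type = "research"
    · subst h2; exact pvFB2 providers
    · by_cases h3 : task_type = "bug-analysis"
      · subst h3; exact pvFB1 providers
      · by_cases h4 : task_type = "comparison"
        · subst h4; exact pvFB1 providers
        · rw [pvPref_default task_type h1 h2 h3 h4]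
          exact pvFB2 providers
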